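-- pv_equiv track=rewrite | github.com/WolfDanny/Homeostatic_Competition | homeostatic/definitions.py | level_states
-- ===== SOURCE A (Python) =====
-- def level_states(level, dimension):
--     """
--     Creates a list of all non-absorbed states in ``level``.
--
--     Parameters
--     ----------
--     level : int
--         Level of the state space.
--     dimension : int
--         Number of clonotypes.
--
--     Returns
--     -------
--     state_list : list[list[int]]
--         List of all states in level.
--     """
--
--     state_list = []
--     n = [1 for _ in range(dimension)]
--
--     while True:
--
--         if sum(n) == level:
--             state_list.append(n[:])
--
--         n[0] += 1
--         for i, _ in enumerate(n):
--             if n[i] > level - dimension + 1: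
--                 if (i + 1) < len(n):
--                     n[i + 1] += 1
--                     n[i] = 1
--                 for j in range(i):
--                     n[j] = 1
--
--         if n[-1] > level - dimension + 1:
--             break
--
--     return state_list
-- ===== SOURCE B (Python) =====
-- def level_states(level, dimension):
--     """Faster re-implementation: builds the compositions of `level` into
--     `dimension` positive parts bottom-up (row j holds the compositions of
--     level - dimension + j into j parts), emitting them in the same
--     (last-coordinate-slowest) order as the original enumeration."""
--     if dimension <= 0 or level < dimension:
--         return []
--     rows = [[level - dimension + 1]]
--     for _ in range(dimension - 1):
--         new_rows = []
--         for u in rows: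
--             m = u[0]
--             for b in range(1, m + 1):
--                 new_rows.append([m + 1 - b, b] + u[1:])
--         rows = new_rows
--     return rows
-- ===== Notes on version B (the rewrite author's own statement) =====
-- stated objective: alternative
-- what changed: A sweeps an odometer over the whole box {1..level-dimension+1}^dimension and keeps the vectors summing to level; B never visits a non-solution: it grows rows bottom-up (row j = the compositions of level-dimension+j into j positive parts, obtained by splitting the first part of each previous row), emitting exactly A's order.
import Mathlib
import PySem

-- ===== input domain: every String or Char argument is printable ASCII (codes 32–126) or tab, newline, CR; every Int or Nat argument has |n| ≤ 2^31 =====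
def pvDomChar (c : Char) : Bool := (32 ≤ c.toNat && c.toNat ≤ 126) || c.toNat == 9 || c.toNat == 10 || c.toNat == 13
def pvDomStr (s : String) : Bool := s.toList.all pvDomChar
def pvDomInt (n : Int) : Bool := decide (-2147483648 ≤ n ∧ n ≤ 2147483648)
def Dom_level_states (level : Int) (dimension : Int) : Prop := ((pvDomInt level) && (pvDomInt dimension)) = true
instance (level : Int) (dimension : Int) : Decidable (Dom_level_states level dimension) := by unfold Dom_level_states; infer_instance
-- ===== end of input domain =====

-- B replaces A's exhaustive odometer scan over all vectors in {1..level-dimension+1}^dimension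
-- by bottom-up generation of exactly the compositions of `level` into `dimension` positive parts,
-- in the same emission order (last coordinate slowest), so it never visits a non-solution.

-- ===== PORT A =====
-- 'for j in range(i): n[j] = 1' — walk the list assigning 1 to every index below i
def pvReset : List Int → Nat → List Int
  | n, 0 => n
  | [], _ => []
  | _ :: t, i + 1 => 1 :: pvReset t i

-- one step of 'for i, _ in enumerate(n): ...' (index accesses are always in range inside Pre_)
def pvCascStep (level : Int) (dimension : Int) (n : List Int) (i : Nat) : List Int :=
  if n.getD i 0 > level - dimension + 1 then
    let n' := if i + 1 < n.length then (n.set (i + 1) (n.getD (i + 1) 0 + 1)).set i 1 else n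
    pvReset n' i
  else n

-- the 'while True' loop; fuel is a generous upper bound on the number of iterations,
-- a totality guard only (the Python loop terminates whenever dimension ≥ 1)
def pvLoop (level : Int) (dimension : Int) : Nat → List Int → List (List Int) → List (List Int)
  | 0, _, acc => acc
  | fuel + 1, n, acc =>
    let acc' := if n.sum = level then acc ++ [n] else acc
    let n' := (List.range n.length).foldl (pvCascStep level dimension) (n.set 0 (n.getD 0 0 + 1))
    if (PySem.List.pyGet? n' (-1)).getD 0 > level - dimension + 1 then acc'
    else pvLoop level dimension fuel n' acc'

def level_states (level : Int) (dimension : Int) : List (List Int) :=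
  pvLoop level dimension ((level.toNat + 2) ^ dimension.toNat + 2)
    (List.replicate dimension.toNat 1) []

-- ===== PORT B =====
-- inner two loops of one pass: 'for u in rows: m = u[0]; for b in range(1, m+1): new_rows.append([m+1-b, b] + u[1:])'
-- (u[0] is always in range here; u[1:] on a list is exactly List.drop 1)
def pvStepRows (rows : List (List Int)) : List (List Int) :=
  rows.foldl (fun acc u =>
    let m := PySem.List.pyGetD u 0 0
    (PySem.List.pyRange 1 (m + 1) 1).foldl
      (fun acc2 b => acc2 ++ [(m + 1 - b) :: b :: u.drop 1]) acc) []

def level_states_alt (level : Int) (dimension : Int) : List (List Int) :=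
  if dimension ≤ 0 ∨ level < dimension then []
  else (List.range (dimension.toNat - 1)).foldl (fun rows _ => pvStepRows rows)
    [[level - dimension + 1]]

-- ===== PRECONDITION & SPEC =====
-- A raises IndexError (n[0] += 1 on the empty list) whenever dimension ≤ 0; nothing else is excluded.
def Pre_level_states (level : Int) (dimension : Int) : Prop := 1 ≤ dimension
instance (level : Int) (dimension : Int) : Decidable (Pre_level_states level dimension) := by
  unfold Pre_level_states; infer_instance

def pvWitness_level_states : Int × Int := (4, 2)

def Spec_level_states (level : Int) (dimension : Int) (out : List (List Int)) : Prop :=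
  out = level_states_alt level dimension
instance (level : Int) (dimension : Int) (out : List (List Int)) : Decidable (Spec_level_states level dimension out) := by
  unfold Spec_level_states; infer_instance

-- ===== CLAIM (what is proved, stated in full; the proofs are below) =====
def Claim_equal_level_states : Prop := ∀ (level : Int) (dimension : Int), Dom_level_states level dimension → Pre_level_states level dimension → Spec_level_states level dimension (level_states level dimension)

-- ===== LEMMAS AND PROOFS =====

-- proof-side closed recursion for the cascade 'for i' loop (M := level - dimension + 1)
def pvCasc (M : Int) : List Int → List Int
  | [] => []
  | x :: rest =>
    if x > M then
      match rest with
      | [] => [x]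
      | y :: rs => 1 :: pvCasc M ((y + 1) :: rs)
    else x :: rest
termination_by n => n.length
decreasing_by simp

-- in-range states
def pvInR (M : Int) (n : List Int) : Prop := ∀ y ∈ n, 1 ≤ y ∧ y ≤ M

-- the odometer successor
def pvSucc (M : Int) : List Int → List Int
  | [] => []
  | x :: t => pvCasc M ((x + 1) :: t)

-- intR a b = [a, a+1, ..., b]
def pvIntR (a b : Int) : List Int := PySem.List.pyRange a (b + 1) 1

-- states enumerated from state n onwards, in A's counter order (head fastest)
def pvEG (M : Int) : List Int → List (List Int)
  | [] => []
  | x :: t =>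
    (pvIntR x M).map (· :: t) ++
      ((pvEG M t).drop 1).flatMap (fun t' => (pvIntR 1 M).map (· :: t'))

-- the full grid in counter order, cons form
def pvGc (M : Int) : Nat → List (List Int)
  | 0 => [[]]
  | k + 1 => (pvGc M k).flatMap (fun t => (pvIntR 1 M).map (· :: t))

-- compositions of s into k positive parts, last part outermost/ascending (proof-side bridge)
def pvComps : Int → Nat → List (List Int)
  | s, 1 => if 1 ≤ s then [[s]] else []
  | s, (k + 2) =>
      (PySem.List.pyRange 1 (s - ((k : Int) + 2) + 2) 1).flatMap
        (fun v => (pvComps (s - v) (k + 1)).map (fun c => c ++ [v]))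
  | _, 0 => []

-- one pass of B's loop merges the first part of each row into two parts
def pvMerge (u : List Int) : List (List Int) :=
  (pvIntR 1 (PySem.List.pyGetD u 0 0)).map
    (fun b => (PySem.List.pyGetD u 0 0 + 1 - b) :: b :: u.drop 1)


-- ---- pvCasc equations ----

theorem pvCasc_le (M x : Int) (rest : List Int) (h : ¬ x > M) : pvCasc M (x :: rest) = x :: rest := by
  unfold pvCasc; simp [h]

theorem pvCasc_gt_nil (M x : Int) (h : x > M) : pvCasc M [x] = [x] := by
  unfold pvCasc; simp [h]

theorem pvCasc_gt_cons (M x y : Int) (rs : List Int) (h : x > M) :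
    pvCasc M (x :: y :: rs) = 1 :: pvCasc M ((y + 1) :: rs) := by
  conv_lhs => rw [pvCasc.eq_def]
  simp [h]

-- ---- cascade fold = pvCasc ----

theorem pv_reset_cons (i : Nat) (m : List Int) :
    pvReset ((1:Int) :: m) (i + 1) = 1 :: pvReset m i := rfl

theorem pv_step_cons (level dimension : Int) (m : List Int) (i : Nat) :
    pvCascStep level dimension ((1:Int) :: m) (i + 1) = 1 :: pvCascStep level dimension m i := by
  unfold pvCascStep
  simp only [List.getD_cons_succ, List.length_cons, List.set_cons_succ]
  by_cases h : m.getD i 0 > level - dimension + 1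
  · simp only [h, if_pos]
    by_cases h2 : i + 1 < m.length
    · simp only [if_pos h2, if_pos (by omega : i + 1 + 1 < m.length + 1)]
      rw [pv_reset_cons]
    · simp only [if_neg h2, if_neg (by omega : ¬ i + 1 + 1 < m.length + 1)]
      rw [pv_reset_cons]
  · simp only [h, if_neg (by omega : ¬ m.getD i 0 > level - dimension + 1)]
    simp [h]

theorem pv_step_foldl_cons (level dimension : Int) (l : List Nat) : ∀ m : List Int,
    (l.map (· + 1)).foldl (pvCascStep level dimension) ((1:Int) :: m)
      = 1 :: l.foldl (pvCascStep level dimension) m := by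
  intro m0
  induction l generalizing m0 with
  | nil => rfl
  | cons a l ih =>
    simp only [List.map_cons, List.foldl_cons, pv_step_cons]
    exact ih (pvCascStep level dimension m0 a)

theorem pv_getD_le (M : Int) (hM : 0 ≤ M) (n : List Int) (h : ∀ y ∈ n, y ≤ M) (i : Nat) :
    n.getD i 0 ≤ M := by
  by_cases hi : i < n.length
  · rw [List.getD_eq_getElem n 0 hi]
    exact h _ (n.getElem_mem hi)
  · rw [List.getD_eq_default n 0 (by omega)]
    exact hM

theorem pv_step_noop (level dimension : Int) (h0 : 0 ≤ level - dimension + 1) :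
    ∀ (l : List Nat) (n : List Int), (∀ y ∈ n, y ≤ level - dimension + 1) →
      l.foldl (pvCascStep level dimension) n = n := by
  intro l
  induction l with
  | nil => intro n h; rfl
  | cons a l ih =>
    intro n h
    have hstep : pvCascStep level dimension n a = n := by
      unfold pvCascStep
      rw [if_neg]
      push_neg
      exact pv_getD_le _ h0 n h a
    simp only [List.foldl_cons, hstep]
    exact ih n h

theorem pv_fold_casc (level dimension : Int) (h0 : 0 ≤ level - dimension + 1) :
    ∀ (t : List Int) (x : Int), (∀ y ∈ t, y ≤ level - dimension + 1) →
      (List.range (x :: t).length).foldl (pvCascStep level dimension) (x :: t)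
        = pvCasc (level - dimension + 1) (x :: t) := by
  intro t
  induction t with
  | nil =>
    intro x _
    simp only [List.length_cons, List.length_nil, List.range_succ, List.range_zero]
    simp only [List.nil_append, List.foldl_cons, List.foldl_nil]
    by_cases hx : x > level - dimension + 1
    · rw [pvCasc_gt_nil _ _ hx]
      unfold pvCascStep
      simp only [List.getD_cons_zero, hx, if_pos]
      norm_num [pvReset]
    · rw [pvCasc_le _ _ _ hx]
      unfold pvCascStep
      simp only [List.getD_cons_zero]
      rw [if_neg (by omega)]
  | cons y rs ih =>
    intro x hle
    have hrs : ∀ z ∈ rs, z ≤ level - dimension + 1 := fun z hz => hle z (List.mem_cons_of_mem _ hz)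
    have hy : y ≤ level - dimension + 1 := hle y List.mem_cons_self
    simp only [List.length_cons]
    rw [List.range_succ_eq_map]
    simp only [List.foldl_cons]
    by_cases hx : x > level - dimension + 1
    · have hstep : pvCascStep level dimension (x :: y :: rs) 0 = 1 :: (y + 1) :: rs := by
        unfold pvCascStep
        simp only [List.getD_cons_zero, hx, if_pos, List.length_cons]
        rw [if_pos (by omega)]
        simp [pvReset, List.set]
      rw [hstep, pv_step_foldl_cons]
      have hih := ih (y + 1) hrs
      simp only [List.length_cons] at hih
      rw [hih, pvCasc_gt_cons _ _ _ _ hx]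
    · have hstep : pvCascStep level dimension (x :: y :: rs) 0 = x :: y :: rs := by
        unfold pvCascStep
        simp only [List.getD_cons_zero]
        rw [if_neg (by omega)]
      rw [hstep]
      rw [List.foldl_map]
      have hnoop := pv_step_noop level dimension h0 ((List.range (rs.length + 1)).map (· + 1)) (x :: y :: rs)
        (by intro z hz
            rcases List.mem_cons.mp hz with h1 | h2
            · omega
            · exact hle z h2)
      rw [List.foldl_map] at hnoop
      rw [hnoop, pvCasc_le _ _ _ hx]

-- ---- pvCasc / pvSucc facts ----

theorem pvCasc_nil (M : Int) : pvCasc M [] = [] := by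
  unfold pvCasc
  rfl

theorem pvSucc_cons (M x : Int) (t : List Int) : pvSucc M (x :: t) = pvCasc M ((x + 1) :: t) := rfl

theorem pvCasc_length (M : Int) : ∀ n : List Int, (pvCasc M n).length = n.length := by
  have key : ∀ (k : Nat) (n : List Int), n.length ≤ k → (pvCasc M n).length = n.length := by
    intro k
    induction k with
    | zero =>
      intro n hn
      have : n = [] := List.eq_nil_of_length_eq_zero (by omega)
      subst this; rw [pvCasc_nil]
    | succ k ih =>
      intro n hn
      match n with
      | [] => rw [pvCasc_nil]
      | [x] =>
        by_cases hx : x > M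
        · rw [pvCasc_gt_nil _ _ hx]
        · rw [pvCasc_le _ _ _ hx]
      | x :: y :: rs =>
        by_cases hx : x > M
        · rw [pvCasc_gt_cons _ _ _ _ hx]
          simp only [List.length_cons]
          rw [ih ((y + 1) :: rs) (by simp only [List.length_cons] at hn ⊢; omega)]
          simp
        · rw [pvCasc_le _ _ _ hx]
  intro n
  exact key n.length n le_rfl

theorem pvSucc_length (M : Int) (x : Int) (t : List Int) :
    (pvSucc M (x :: t)).length = t.length + 1 := by
  rw [pvSucc_cons, pvCasc_length]
  simp

theorem pvSucc_ne_nil (M : Int) (x : Int) (t : List Int) : pvSucc M (x :: t) ≠ [] := by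
  intro h
  have := pvSucc_length M x t
  rw [h] at this
  simp at this

theorem pvCasc_allM (M : Int) : ∀ k : Nat,
    pvCasc M ((M + 1) :: List.replicate k M) = List.replicate k (1:Int) ++ [M + 1] := by
  intro k
  induction k with
  | zero => simp [pvCasc_gt_nil M (M+1) (by omega)]
  | succ k ih =>
    rw [List.replicate_succ, pvCasc_gt_cons _ _ _ _ (by omega : M + 1 > M)]
    rw [show M + 1 = M + 1 from rfl] at ih
    rw [ih, List.replicate_succ]
    simp

theorem pvSucc_inR (M : Int) : ∀ n : List Int, pvInR M n → n ≠ [] →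
    n ≠ List.replicate n.length M → pvInR M (pvSucc M n) := by
  intro n
  induction n with
  | nil => intro _ h; exact absurd rfl h
  | cons x t ih =>
    intro hin hne hrep
    have hx : 1 ≤ x ∧ x ≤ M := hin x List.mem_cons_self
    have htin : pvInR M t := fun z hz => hin z (List.mem_cons_of_mem _ hz)
    rw [pvSucc_cons]
    by_cases hgt : x + 1 > M
    · have hxM : x = M := by omega
      match t with
      | [] =>
        exfalso
        exact hrep (by simp [hxM])
      | y :: rs =>
        rw [pvCasc_gt_cons _ _ _ _ hgt, ← pvSucc_cons]
        have ht : pvInR M (pvSucc M (y :: rs)) := by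
          apply ih htin (by simp)
          intro h
          exact hrep (by
            simp only [List.length_cons, List.replicate_succ]
            rw [hxM]
            exact congrArg (List.cons M)
              (by rw [h]; simp [List.replicate_succ]))
        intro z hz
        rcases List.mem_cons.mp hz with h1 | h2
        · subst h1; exact ⟨le_refl 1, by omega⟩
        · exact ht z h2
    · rw [pvCasc_le _ _ _ hgt]
      intro z hz
      rcases List.mem_cons.mp hz with h1 | h2
      · subst h1; omega
      · exact htin z h2

-- ---- pvIntR facts ----

theorem pv_intR_cons (a b : Int) (h : a ≤ b) : pvIntR a b = a :: pvIntR (a + 1) b := by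
  unfold pvIntR
  exact PySem.List.pyRange_one_cons (by omega)

theorem pv_intR_nil (a b : Int) (h : b < a) : pvIntR a b = [] := by
  unfold pvIntR
  exact PySem.List.pyRange_one_eq_nil (by omega)

theorem pv_mem_intR (a b x : Int) : x ∈ pvIntR a b ↔ a ≤ x ∧ x ≤ b := by
  unfold pvIntR
  rw [PySem.List.mem_pyRange_one]
  omega

theorem pv_intR_filter (s : Int) : ∀ (k : Nat) (a b : Int), (b + 1 - a).toNat = k →
    (pvIntR a b).filter (fun v => decide (v = s)) = if a ≤ s ∧ s ≤ b then [s] else [] := by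
  intro k
  induction k with
  | zero =>
    intro a b hk
    rw [pv_intR_nil a b (by omega)]
    rw [if_neg (by omega)]
    rfl
  | succ k ih =>
    intro a b hk
    rw [pv_intR_cons a b (by omega)]
    rw [List.filter_cons]
    by_cases has : a = s
    · subst has
      simp only [decide_true, if_pos]
      rw [ih (a + 1) b (by omega)]
      rw [if_neg (by omega), if_pos (by omega)]
    · simp only [decide_eq_true_eq, has, ite_false]
      rw [ih (a + 1) b (by omega)]
      split_ifs with h1 h2 h2
      · rfl
      · omega
      · omega
      · rfl

-- ---- pvEG facts ----

theorem pvEG_cons (M x : Int) (t : List Int) :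
    pvEG M (x :: t) = (pvIntR x M).map (· :: t) ++
      ((pvEG M t).drop 1).flatMap (fun t' => (pvIntR 1 M).map (· :: t')) := rfl

theorem pvEG_head (M : Int) : ∀ n : List Int, pvInR M n → n ≠ [] →
    pvEG M n = n :: (pvEG M n).drop 1 := by
  intro n hin hne
  match n with
  | x :: t =>
    have hx : 1 ≤ x ∧ x ≤ M := hin x List.mem_cons_self
    rw [pvEG_cons, pv_intR_cons x M hx.2]
    simp

theorem pvEG_allM (M : Int) : ∀ k : Nat, pvEG M (List.replicate (k + 1) M) = [List.replicate (k + 1) M] := by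
  intro k
  induction k with
  | zero =>
    rw [show List.replicate 1 M = [M] from rfl, pvEG_cons]
    rw [pv_intR_cons M M le_rfl, pv_intR_nil (M + 1) M (by omega)]
    simp [pvEG]
  | succ k ih =>
    rw [List.replicate_succ, pvEG_cons, ih]
    rw [pv_intR_cons M M le_rfl, pv_intR_nil (M + 1) M (by omega)]
    simp [← List.replicate_succ]

theorem pv_repl_cons (x : Int) (t : List Int) (M : Int) :
    (x :: t = List.replicate (x :: t).length M) ↔ (x = M ∧ t = List.replicate t.length M) := by
  simp [List.replicate_succ]

theorem pvEG_tail (M : Int) : ∀ n : List Int, pvInR M n → n ≠ [] →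
    (pvEG M n).drop 1 = if n = List.replicate n.length M then [] else pvEG M (pvSucc M n) := by
  intro n
  induction n with
  | nil => intro _ h; exact absurd rfl h
  | cons x t ih =>
    intro hin hne
    have hx : 1 ≤ x ∧ x ≤ M := hin x List.mem_cons_self
    have htin : pvInR M t := fun z hz => hin z (List.mem_cons_of_mem _ hz)
    rw [pvEG_cons]
    by_cases hxM : x = M
    · rw [hxM]
      rw [pv_intR_cons M M le_rfl, pv_intR_nil (M + 1) M (by omega)]
      simp only [List.map_nil, List.map_cons, List.cons_append, List.nil_append,
        List.drop_succ_cons, List.drop_zero]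
      match t with
      | [] =>
        rw [if_pos (by simp)]
        simp [pvEG]
      | y :: rs =>
        rw [ih htin (by simp)]
        by_cases ht : (y :: rs) = List.replicate (y :: rs).length M
        · rw [if_pos ht, if_pos]
          · simp
          · rw [pv_repl_cons]
            exact ⟨rfl, ht⟩
        · rw [if_neg ht, if_neg (by rw [pv_repl_cons]; exact fun h => ht h.2)]
          have hsuccn : pvSucc M (M :: y :: rs) = 1 :: pvSucc M (y :: rs) := by
            rw [pvSucc_cons, pvCasc_gt_cons _ _ _ _ (by omega : M + 1 > M)]
            rfl
          rw [hsuccn, pvEG_cons]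
          have hsin : pvInR M (pvSucc M (y :: rs)) := pvSucc_inR M (y :: rs) htin (by simp) ht
          have hsne : pvSucc M (y :: rs) ≠ [] := pvSucc_ne_nil M y rs
          rw [pvEG_head M _ hsin hsne]
          simp
    · have hxlt : x < M := by omega
      rw [pv_intR_cons x M hx.2]
      rw [if_neg (by rw [pv_repl_cons]; exact fun h => hxM h.1)]
      have hsucc : pvSucc M (x :: t) = (x + 1) :: t := by
        rw [pvSucc_cons, pvCasc_le _ _ _ (by omega)]
      rw [hsucc, pvEG_cons]
      simp

-- ---- loop = filter over pvEG ----

theorem pvLoop_eq (level dimension : Int) (hM : 1 ≤ level - dimension + 1) :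
    ∀ (fuel : Nat) (n : List Int) (acc : List (List Int)), pvInR (level - dimension + 1) n → n ≠ [] →
      (pvEG (level - dimension + 1) n).length ≤ fuel →
      pvLoop level dimension fuel n acc
        = acc ++ (pvEG (level - dimension + 1) n).filter (fun m => decide (m.sum = level)) := by
  intro fuel
  induction fuel with
  | zero =>
    intro n acc hin hne hlen
    exfalso
    rw [pvEG_head _ n hin hne] at hlen
    simp at hlen
  | succ fuel ih =>
    intro n acc hin hne hlen
    match n with
    | x :: t =>
      have htle : ∀ y ∈ t, y ≤ level - dimension + 1 := fun z hz => (hin z (List.mem_cons_of_mem _ hz)).2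
      simp only [pvLoop, List.getD_cons_zero, List.set_cons_zero]
      have hfold := pv_fold_casc level dimension (by omega) t (x + 1) htle
      simp only [List.length_cons] at hfold ⊢
      rw [hfold, ← pvSucc_cons]
      by_cases hrep : (x :: t) = List.replicate (x :: t).length (level - dimension + 1)
      · have h1 := (pv_repl_cons x t (level - dimension + 1)).mp hrep
        have hsucc : pvSucc (level - dimension + 1) (x :: t)
            = List.replicate t.length 1 ++ [(level - dimension + 1) + 1] := by
          rw [pvSucc_cons, h1.1]
          conv_lhs => rw [h1.2]
          exact pvCasc_allM _ t.length
        rw [hsucc, PySem.List.pyGet?_neg_one_append_singleton]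
        simp only [Option.getD_some]
        rw [if_pos (by omega)]
        have hEG : pvEG (level - dimension + 1) (x :: t) = [x :: t] := by
          have hx2 : x :: t = List.replicate (t.length + 1) (level - dimension + 1) := by
            simpa using hrep
          rw [hx2]
          exact pvEG_allM _ t.length
        rw [hEG]
        simp only [List.filter_cons, List.filter_nil]
        by_cases hs : x + t.sum = level
        · simp [hs]
        · simp [hs]
      · have hsin := pvSucc_inR _ (x :: t) hin hne hrep
        have hsne := pvSucc_ne_nil (level - dimension + 1) x t
        have hlast : (PySem.List.pyGet? (pvSucc (level - dimension + 1) (x :: t)) (-1)).getD 0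
            ≤ level - dimension + 1 := by
          rw [PySem.List.pyGet?_neg_one, List.getLast?_eq_some_getLast hsne]
          exact (hsin _ (List.getLast_mem hsne)).2
        rw [if_neg (not_lt.mpr hlast)]
        have hEGn : pvEG (level - dimension + 1) (x :: t)
            = (x :: t) :: pvEG (level - dimension + 1) (pvSucc (level - dimension + 1) (x :: t)) := by
          conv_lhs => rw [pvEG_head _ _ hin hne, pvEG_tail _ _ hin hne, if_neg hrep]
        rw [ih (pvSucc _ _) _ hsin hsne (by rw [hEGn] at hlen; simp only [List.length_cons] at hlen; omega)]
        rw [hEGn, List.filter_cons]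
        by_cases hs : x + t.sum = level
        · simp [hs]
        · simp [hs]

-- ---- grid facts ----

theorem pvGc_zero (M : Int) : pvGc M 0 = [[]] := rfl

theorem pvGc_succ (M : Int) (k : Nat) :
    pvGc M (k + 1) = (pvGc M k).flatMap (fun t => (pvIntR 1 M).map (· :: t)) := rfl

theorem pvGc_ones (M : Int) (hM : 1 ≤ M) : ∀ k : Nat,
    pvEG M (List.replicate (k + 1) (1:Int)) = pvGc M (k + 1) := by
  intro k
  induction k with
  | zero =>
    rw [show List.replicate 1 (1:Int) = [1] from rfl, pvEG_cons, pvGc_succ, pvGc_zero]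
    rw [show pvEG M ([] : List Int) = [] from rfl]
    simp
  | succ k ih =>
    rw [List.replicate_succ, pvEG_cons, ih]
    have hrin : pvInR M (List.replicate (k + 1) (1:Int)) := by
      intro z hz
      rw [List.eq_of_mem_replicate hz]
      exact ⟨le_rfl, hM⟩
    have hhead : pvGc M (k + 1) = List.replicate (k + 1) (1:Int) :: (pvGc M (k + 1)).drop 1 := by
      rw [← ih]
      exact pvEG_head M _ hrin (by simp)
    conv_rhs => rw [pvGc_succ, hhead]
    rw [List.flatMap_cons]

theorem pvGc_append (M : Int) : ∀ k : Nat,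
    pvGc M (k + 1) = (pvIntR 1 M).flatMap (fun v => (pvGc M k).map (· ++ [v])) := by
  intro k
  induction k with
  | zero =>
    rw [pvGc_succ, pvGc_zero]
    simp only [List.flatMap_cons, List.flatMap_nil, List.append_nil, List.map_cons, List.map_nil,
      List.nil_append]
    induction pvIntR 1 M with
    | nil => simp
    | cons a l ihl => simp_all
  | succ k ih =>
    conv_lhs => rw [pvGc_succ, ih]
    rw [List.flatMap_assoc]
    conv_rhs => rw [pvGc_succ]
    apply List.flatMap_congr
    intro v _
    rw [List.map_flatMap]
    induction pvGc M k with
    | nil => simp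
    | cons t ts iht =>
      simp only [List.flatMap_cons, List.map_cons, List.flatMap_append, iht]
      congr 1
      simp [List.map_map, Function.comp]

theorem pv_mem_Gc_sum (M : Int) : ∀ (k : Nat) (t : List Int), t ∈ pvGc M k → (k : Int) ≤ t.sum := by
  intro k
  induction k with
  | zero =>
    intro t ht
    rw [pvGc_zero] at ht
    simp at ht
    simp [ht]
  | succ k ih =>
    intro t ht
    rw [pvGc_succ, List.mem_flatMap] at ht
    obtain ⟨t', ht', hmem⟩ := ht
    rw [List.mem_map] at hmem
    obtain ⟨v, hv, rfl⟩ := hmem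
    have h1 := ih t' ht'
    have h2 := (pv_mem_intR 1 M v).mp hv
    simp only [List.sum_cons]
    push_cast
    omega

theorem pvGc_length (M : Int) : ∀ k : Nat, (pvGc M k).length = M.toNat ^ k := by
  intro k
  induction k with
  | zero => simp [pvGc_zero]
  | succ k ih =>
    rw [pvGc_succ, List.length_flatMap]
    simp only [List.length_map]
    rw [List.map_const', List.sum_replicate, smul_eq_mul, ih]
    have : (pvIntR 1 M).length = M.toNat := by
      unfold pvIntR
      rw [PySem.List.length_pyRange_one]
      omega
    rw [this, pow_succ]


theorem pvComps_one (s : Int) : pvComps s 1 = if 1 ≤ s then [[s]] else [] := rfl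

theorem pvComps_succ (s : Int) (k : Nat) : pvComps s (k + 2)
    = (PySem.List.pyRange 1 (s - ((k : Int) + 2) + 2) 1).flatMap
        (fun v => (pvComps (s - v) (k + 1)).map (fun c => c ++ [v])) := rfl

theorem pv_comps_eq (level dimension : Int) (hM : 1 ≤ level - dimension + 1) : ∀ (k : Nat) (s : Int),
    s ≤ (level - dimension + 1) + k →
    (pvGc (level - dimension + 1) (k + 1)).filter (fun c => decide (c.sum = s)) = pvComps s (k + 1) := by
  intro k
  induction k with
  | zero =>
    intro s hs
    have h1 : pvGc (level - dimension + 1) 1 = (pvIntR 1 (level - dimension + 1)).map (fun v => [v]) := by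
      rw [pvGc_succ, pvGc_zero]
      simp [List.flatMap_cons]
    rw [h1, List.filter_map]
    have h2 : (pvIntR 1 (level - dimension + 1)).filter ((fun c => decide (c.sum = s)) ∘ fun v => [v])
        = (pvIntR 1 (level - dimension + 1)).filter (fun v => decide (v = s)) := by
      apply List.filter_congr
      intro v _
      simp
    rw [h2, pv_intR_filter s ((level - dimension + 1) + 1 - 1).toNat 1 (level - dimension + 1) rfl]
    rw [pvComps_one]
    push_cast at hs
    split_ifs with hA hB hB
    · rfl
    · omega
    · omega
    · rfl
  | succ k ih =>
    intro s hs
    rw [pvGc_append _ (k + 1), List.filter_flatMap, pvComps_succ]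
    have hsum : ∀ (R : List Int), R.flatMap (fun v =>
          ((pvGc (level - dimension + 1) (k + 1)).map (· ++ [v])).filter (fun c => decide (c.sum = s)))
        = R.flatMap (fun v =>
          ((pvGc (level - dimension + 1) (k + 1)).filter (fun c => decide (c.sum = s - v))).map (· ++ [v])) := by
      intro R
      apply List.flatMap_congr
      intro v _
      rw [List.filter_map]
      congr 1
      apply List.filter_congr
      intro c _
      simp only [Function.comp_apply]
      exact decide_eq_decide.mpr (by rw [List.sum_append]; simp; omega)
    rw [hsum]
    have hrange : PySem.List.pyRange 1 (s - ((k : Int) + 2) + 2) 1 = PySem.List.pyRange 1 (s - (k : Int)) 1 := by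
      rw [show s - ((k : Int) + 2) + 2 = s - (k : Int) from by ring]
    rw [hrange]
    by_cases hcase : 1 ≤ s - (k : Int) - 1
    · have hsplit : pvIntR 1 (level - dimension + 1)
          = PySem.List.pyRange 1 (s - (k : Int)) 1 ++ PySem.List.pyRange (s - (k : Int)) ((level - dimension + 1) + 1) 1 := by
        unfold pvIntR
        exact PySem.List.pyRange_one_append 1 (s - (k : Int)) ((level - dimension + 1) + 1) (by omega) (by omega)
      rw [hsplit, List.flatMap_append]
      have hzero : (PySem.List.pyRange (s - (k : Int)) ((level - dimension + 1) + 1) 1).flatMap (fun v =>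
          ((pvGc (level - dimension + 1) (k + 1)).filter (fun c => decide (c.sum = s - v))).map (· ++ [v])) = [] := by
        apply List.flatMap_eq_nil_iff.mpr
        intro v hv
        have hv1 := (PySem.List.mem_pyRange_one).mp hv
        have : (pvGc (level - dimension + 1) (k + 1)).filter (fun c => decide (c.sum = s - v)) = [] := by
          apply List.filter_eq_nil_iff.mpr
          intro c hc
          have := pv_mem_Gc_sum _ (k + 1) c hc
          push_cast at this
          simp only [decide_eq_true_eq]
          omega
        rw [this, List.map_nil]
      rw [hzero, List.append_nil]
      apply List.flatMap_congr
      intro v hv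
      have hv1 := (PySem.List.mem_pyRange_one).mp hv
      rw [ih (s - v) (by push_cast at hs ⊢; omega)]
    · have hR : PySem.List.pyRange 1 (s - (k : Int)) 1 = [] := PySem.List.pyRange_one_eq_nil (by omega)
      rw [hR, List.flatMap_nil]
      apply List.flatMap_eq_nil_iff.mpr
      intro v hv
      have hv1 := (pv_mem_intR 1 (level - dimension + 1) v).mp hv
      have : (pvGc (level - dimension + 1) (k + 1)).filter (fun c => decide (c.sum = s - v)) = [] := by
        apply List.filter_eq_nil_iff.mpr
        intro c hc
        have := pv_mem_Gc_sum _ (k + 1) c hc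
        push_cast at this
        simp only [decide_eq_true_eq]
        omega
      rw [this, List.map_nil]

-- ---- the level < dimension case ----

theorem pv_fold_low (level dimension : Int) (h0 : level - dimension + 1 ≤ 0) : ∀ k : Nat,
    (List.range (k + 1)).foldl (pvCascStep level dimension) ((2:Int) :: List.replicate k 1)
      = List.replicate k (1:Int) ++ [2] := by
  intro k
  induction k with
  | zero =>
    simp only [List.range_succ, List.range_zero, List.nil_append, List.foldl_cons, List.foldl_nil]
    unfold pvCascStep
    rw [if_pos (by simp; omega)]
    norm_num [pvReset]
  | succ k ih =>
    rw [List.range_succ_eq_map]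
    simp only [List.foldl_cons]
    have hstep : pvCascStep level dimension ((2:Int) :: List.replicate (k + 1) 1) 0
        = 1 :: 2 :: List.replicate k 1 := by
      unfold pvCascStep
      rw [if_pos (by simp; omega)]
      rw [if_pos (by simp)]
      simp [pvReset, List.replicate_succ, List.set]
    rw [hstep, pv_step_foldl_cons, ih, List.replicate_succ]
    simp

theorem pvLoop_low (level dimension : Int) (h0 : level - dimension + 1 ≤ 0) (k : Nat)
    (hdim : dimension = (k : Int) + 1) (fuel : Nat) :
    pvLoop level dimension (fuel + 1) (List.replicate (k + 1) 1) [] = [] := by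
  have hsum : (List.replicate (k + 1) (1:Int)).sum = (k : Int) + 1 := by
    rw [List.sum_replicate_int]
    push_cast
    ring
  have hne : ¬ ((List.replicate (k + 1) (1:Int)).sum = level) := by
    rw [hsum]
    omega
  have hset : (List.replicate (k + 1) (1:Int)).set 0 ((List.replicate (k + 1) (1:Int)).getD 0 0 + 1)
      = 2 :: List.replicate k 1 := by
    rw [List.replicate_succ]
    norm_num
  have hlen : (List.replicate (k + 1) (1:Int)).length = k + 1 := by simp
  have hfold := pv_fold_low level dimension h0 k
  simp only [pvLoop, hset, hlen, hfold]
  rw [PySem.List.pyGet?_neg_one_append_singleton]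
  simp only [Option.getD_some]
  rw [if_pos (by omega), if_neg hne]

theorem pvStepRows_eq (rows : List (List Int)) : pvStepRows rows = rows.flatMap pvMerge := by
  unfold pvStepRows pvMerge pvIntR
  simp only [PySem.List.foldl_append_singleton_eq_map]
  exact PySem.List.foldl_append_eq_flatMap _ _ _

theorem pv_comps_ne_nil : ∀ (k : Nat) (s : Int) (c : List Int), c ∈ pvComps s (k + 1) → c ≠ [] := by
  intro k
  match k with
  | 0 =>
    intro s c hc
    rw [pvComps_one] at hc
    split_ifs at hc with h
    · simp at hc
      simp [hc]
    · simp at hc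
  | j + 1 =>
    intro s c hc
    rw [pvComps_succ] at hc
    rw [List.mem_flatMap] at hc
    obtain ⟨v, _, hc⟩ := hc
    rw [List.mem_map] at hc
    obtain ⟨c', _, rfl⟩ := hc
    simp

theorem pv_flatMap_single {α β : Type} (l : List α) (f : α → β) :
    l.flatMap (fun v => [f v]) = l.map f := by
  induction l with
  | nil => rfl
  | cons a l ih => simp [ih]

theorem pv_merge_cons (x : Int) (t : List Int) :
    pvMerge (x :: t) = (pvIntR 1 x).map (fun b => (x + 1 - b) :: b :: t) := by
  unfold pvMerge
  simp [PySem.List.pyGetD_zero_cons]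

theorem pv_merge_append (u : List Int) (v : Int) (hu : u ≠ []) :
    (pvMerge u).map (· ++ [v]) = pvMerge (u ++ [v]) := by
  match u with
  | x :: t =>
    rw [pv_merge_cons, List.cons_append, pv_merge_cons, List.map_map]
    apply List.map_congr_left
    intro b _
    simp

theorem pv_merge_step : ∀ (k : Nat) (t : Int),
    pvComps (t + 1) (k + 2) = (pvComps t (k + 1)).flatMap pvMerge := by
  intro k
  induction k with
  | zero =>
    intro t
    rw [pvComps_succ, pvComps_one]
    rw [show t + 1 - ((0 : Nat) + 2 : Int) + 2 = t + 1 from by push_cast; ring]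
    by_cases ht : 1 ≤ t
    · rw [if_pos ht]
      rw [List.flatMap_cons, List.flatMap_nil, List.append_nil, pv_merge_cons]
      have hcong : ∀ v ∈ PySem.List.pyRange 1 (t + 1) 1,
          (pvComps (t + 1 - v) 1).map (fun c => c ++ [v]) = [[t + 1 - v, v]] := by
        intro v hv
        have hv1 := (PySem.List.mem_pyRange_one).mp hv
        rw [pvComps_one, if_pos (by omega)]
        rfl
      rw [List.flatMap_congr hcong, pv_flatMap_single]
      rfl
    · rw [if_neg ht]
      rw [List.flatMap_nil]
      rw [PySem.List.pyRange_one_eq_nil (by omega), List.flatMap_nil]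
  | succ k ih =>
    intro t
    rw [pvComps_succ, pvComps_succ]
    rw [show t + 1 - ((k + 1 : Nat) + 2 : Int) + 2 = t - k from by push_cast; ring]
    rw [show t - ((k : Nat) + 2 : Int) + 2 = t - k from by push_cast; ring]
    rw [List.flatMap_assoc]
    apply List.flatMap_congr
    intro v _
    rw [show t + 1 - v = (t - v) + 1 from by ring, ih (t - v), List.map_flatMap]
    have hmapmap : ∀ u ∈ pvComps (t - v) (k + 1),
        (pvMerge u).map (fun c => c ++ [v]) = pvMerge (u ++ [v]) :=
      fun u hu => pv_merge_append u v (pv_comps_ne_nil k (t - v) u hu)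
    rw [List.flatMap_congr hmapmap]
    induction pvComps (t - v) (k + 1) with
    | nil => simp
    | cons u us ihu =>
      simp only [List.map_cons, List.flatMap_cons, List.flatMap_append, ihu]

theorem pv_iter (s : Int) (hs : 1 ≤ s) : ∀ j : Nat,
    (List.range j).foldl (fun rows _ => pvStepRows rows) [[s]] = pvComps (s + j) (j + 1) := by
  intro j
  induction j with
  | zero =>
    rw [List.range_zero, List.foldl_nil]
    simp [pvComps_one, hs]
  | succ j ih =>
    rw [List.range_succ, List.foldl_append, ih, List.foldl_cons, List.foldl_nil]
    rw [pvStepRows_eq, ← pv_merge_step j (s + j)]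
    congr 1
    push_cast
    ring

-- ===== VERDICT (by name: the statement is the Claim_ definition above) =====
theorem level_states_spec : Claim_equal_level_states := by
  unfold Claim_equal_level_states
  intro level dimension _ hpre
  unfold Pre_level_states at hpre
  unfold Spec_level_states level_states level_states_alt
  obtain ⟨k, hk⟩ : ∃ k : Nat, dimension.toNat = k + 1 := ⟨dimension.toNat - 1, by omega⟩
  rw [hk]
  have hdim : dimension = (k : Int) + 1 := by omega
  by_cases hM : 1 ≤ level - dimension + 1
  · have hin : pvInR (level - dimension + 1) (List.replicate (k + 1) (1:Int)) := by
      intro z hz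
      rw [List.eq_of_mem_replicate hz]
      exact ⟨le_rfl, by omega⟩
    have hEG := pvGc_ones (level - dimension + 1) hM k
    have hlen : (pvEG (level - dimension + 1) (List.replicate (k + 1) (1:Int))).length
        ≤ (level.toNat + 2) ^ (k + 1) + 2 := by
      rw [hEG, pvGc_length]
      have h1 : (level - dimension + 1).toNat ≤ level.toNat + 2 := by omega
      have h2 := Nat.pow_le_pow_left h1 (k + 1)
      omega
    rw [pvLoop_eq level dimension hM _ _ _ hin (by simp) hlen]
    rw [List.nil_append, hEG]
    rw [if_neg (by omega)]
    rw [show k + 1 - 1 = k from rfl]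
    rw [pv_iter (level - dimension + 1) (by omega) k]
    rw [show level - dimension + 1 + (k : Int) = level from by omega]
    exact pv_comps_eq level dimension hM k level (by omega)
  · rw [show (level.toNat + 2) ^ (k + 1) + 2 = ((level.toNat + 2) ^ (k + 1) + 1) + 1 from rfl]
    rw [pvLoop_low level dimension (by omega) k hdim _]
    rw [if_pos (by omega)]
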